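-- pv_equiv track=rewrite | github.com/appleeatsapples-lang/SIRR | Engine/unified_synthesis.py | _theme
-- ===== SOURCE A (Python) =====
-- NUMBER_THEMES = {
--     1: "independence",
--     2: "partnership",
--     3: "expression",
--     4: "structure",
--     5: "change",
--     6: "responsibility",
--     7: "analysis",
--     8: "authority",
--     9: "completion",
--     11: "vision",
--     22: "building",
--     33: "teaching",
-- }
--
-- def _theme(n: int) -> str:
--     """Return theme word for a number, with graceful fallback."""
--     if n in NUMBER_THEMES:
--         return NUMBER_THEMES[n]
--     # Reduce compound numbers to single digit (preserving masters)
--     if n > 9 and n not in (11, 22, 33):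
--         r = sum(int(d) for d in str(n))
--         while r > 9:
--             r = sum(int(d) for d in str(r))
--         return NUMBER_THEMES.get(r, "self")
--     return "self"
-- ===== SOURCE B (Python) =====
-- NUMBER_THEMES = {
--     1: "independence",
--     2: "partnership",
--     3: "expression",
--     4: "structure",
--     5: "change",
--     6: "responsibility",
--     7: "analysis",
--     8: "authority",
--     9: "completion",
--     11: "vision",
--     22: "building",
--     33: "teaching",
-- }
--
-- def _theme(n: int) -> str:
--     """Return theme word for a number, with graceful fallback."""
--     if n in NUMBER_THEMES:
--         return NUMBER_THEMES[n]
--     if n > 9: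
--         # digital root, closed form: always in 1..9, always a key
--         return NUMBER_THEMES[1 + (n - 1) % 9]
--     return "self"
-- ===== Notes on version B (the rewrite author's own statement) =====
-- stated objective: idiomatic
-- what changed: Replaces the iterative digit-sum reduction loop (repeatedly stringifying the number and summing its digit characters until a single digit remains) with the arithmetic digital-root closed form 1 + (n - 1) % 9, dropping the then-redundant master-number guard and .get fallback.
import Mathlib
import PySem

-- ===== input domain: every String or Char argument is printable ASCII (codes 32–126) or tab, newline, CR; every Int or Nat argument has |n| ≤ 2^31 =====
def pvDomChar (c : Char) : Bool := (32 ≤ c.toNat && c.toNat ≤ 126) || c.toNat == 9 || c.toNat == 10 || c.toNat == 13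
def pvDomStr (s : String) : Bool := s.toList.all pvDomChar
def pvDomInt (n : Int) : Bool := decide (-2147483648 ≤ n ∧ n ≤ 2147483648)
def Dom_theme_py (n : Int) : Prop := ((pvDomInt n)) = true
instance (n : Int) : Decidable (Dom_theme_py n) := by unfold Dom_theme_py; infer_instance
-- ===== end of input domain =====

-- B replaces A's iterative digit-sum reduction loop by the digital-root closed form (same value on every input); objective: idiomatic.

-- ===== PORT A =====
-- module constant NUMBER_THEMES
def themeTable : PySem.Dict Int String :=
  PySem.Dict.ofList [(1, "independence"), (2, "partnership"), (3, "expression"),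
    (4, "structure"), (5, "change"), (6, "responsibility"), (7, "analysis"),
    (8, "authority"), (9, "completion"), (11, "vision"), (22, "building"), (33, "teaching")]

-- sum(int(d) for d in str(r)); int(d) on a single decimal-digit character is its code minus 48
-- (exact here: str() of the nonnegative numbers this is applied to yields only digit characters)
def pyDigitSum (r : Int) : Int :=
  ((PySem.Int.toChars r).map (fun c => ((c.toNat : Int) - 48))).sum

-- The next lemmas exist only so that the port's `while` loop (pyReduce) can cite a
-- decreasing measure; they characterise pyDigitSum via Nat.digits.
lemma digitChar_toNat {d : ℕ} (h : d < 10) : (Nat.digitChar d).toNat = 48 + d := by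
  interval_cases d <;> decide

lemma toDigitsCore_eq (n : ℕ) : ∀ (f : ℕ) (ds : List Char), 0 < n → n < 10 ^ f →
    Nat.toDigitsCore 10 f n ds = ((Nat.digits 10 n).map Nat.digitChar).reverse ++ ds := by
  induction n using Nat.strong_induction_on with
  | _ n IH =>
    intro f ds hn hf
    match f with
    | 0 => simp at hf; omega
    | f + 1 =>
      rw [Nat.toDigitsCore]
      by_cases h0 : n / 10 = 0
      · have hlt : n < 10 := by omega
        rw [if_pos h0, Nat.digits_def' (by norm_num : (1:ℕ) < 10) hn, h0]
        simp
      · rw [if_neg h0]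
        have hdiv : n / 10 < 10 ^ f := by
          rw [Nat.div_lt_iff_lt_mul (by norm_num)]
          rw [pow_succ] at hf; exact hf
        rw [IH (n / 10) (Nat.div_lt_self hn (by norm_num)) f _ (Nat.pos_of_ne_zero h0) hdiv,
          Nat.digits_def' (by norm_num : (1:ℕ) < 10) hn]
        simp

lemma pyDigitSum_eq (r : Int) (h : 0 < r) :
    pyDigitSum r = ((Nat.digits 10 r.toNat).sum : Int) := by
  have hneg : ¬ r < 0 := by omega
  have h0 : 0 < r.toNat := by omega
  have hpow : r.toNat < 10 ^ (r.toNat + 1) :=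
    lt_of_lt_of_le (Nat.lt_pow_self (by norm_num))
      (Nat.pow_le_pow_right (by norm_num) (by omega))
  unfold pyDigitSum
  simp only [PySem.Int.toChars, if_neg hneg, Nat.toDigits]
  rw [toDigitsCore_eq r.toNat (r.toNat + 1) [] h0 hpow, List.append_nil,
    List.map_reverse, List.sum_reverse, List.map_map]
  rw [List.map_congr_left (g := fun d : ℕ => (d : Int))
    (fun d hd => by
      simp only [Function.comp_apply]
      rw [digitChar_toNat (Nat.digits_lt_base (by norm_num) hd)]
      push_cast; ring)]
  rw [Nat.cast_list_sum]

lemma sum_digits_le (m : ℕ) : 0 < m → (Nat.digits 10 m).sum ≤ m := by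
  induction m using Nat.strong_induction_on with
  | _ m IH =>
    intro hm
    rw [Nat.digits_def' (by norm_num : (1:ℕ) < 10) hm]
    by_cases h0 : m / 10 = 0
    · rw [h0]; simp; omega
    · have := IH (m / 10) (Nat.div_lt_self hm (by norm_num)) (Nat.pos_of_ne_zero h0)
      have hdm := Nat.div_add_mod m 10
      simp only [List.sum_cons]
      omega

lemma sum_digits_pos (m : ℕ) : 0 < m → 0 < (Nat.digits 10 m).sum := by
  induction m using Nat.strong_induction_on with
  | _ m IH =>
    intro hm
    rw [Nat.digits_def' (by norm_num : (1:ℕ) < 10) hm]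
    by_cases hr : 0 < m % 10
    · simp only [List.sum_cons]; omega
    · have h0 : 0 < m / 10 := by omega
      have := IH (m / 10) (Nat.div_lt_self hm (by norm_num)) h0
      simp only [List.sum_cons]; omega

lemma sum_digits_lt (m : ℕ) (h : 10 ≤ m) : (Nat.digits 10 m).sum < m := by
  rw [Nat.digits_def' (by norm_num : (1:ℕ) < 10) (by omega)]
  have h1 : 0 < m / 10 := by omega
  have h2 := sum_digits_le (m / 10) h1
  have hdm := Nat.div_add_mod m 10
  simp only [List.sum_cons]
  omega

lemma pyDigitSum_pos (r : Int) (h : 0 < r) : 0 < pyDigitSum r := by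
  rw [pyDigitSum_eq r h]
  have := sum_digits_pos r.toNat (by omega)
  omega

lemma pyDigitSum_lt (r : Int) (h : 9 < r) : pyDigitSum r < r := by
  rw [pyDigitSum_eq r (by omega)]
  have := sum_digits_lt r.toNat (by omega)
  omega

-- while r > 9: r = sum(int(d) for d in str(r))
def pyReduce (r : Int) : Int :=
  if h : 9 < r then pyReduce (pyDigitSum r) else r
termination_by r.toNat
decreasing_by
  have h1 := pyDigitSum_lt r h
  have h2 := pyDigitSum_pos r (by omega)
  omega

def theme_py (n : Int) : String :=
  match themeTable.get? n with          -- `if n in NUMBER_THEMES: return NUMBER_THEMES[n]`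
  | some s => s
  | none =>
    if 9 < n ∧ ¬(n = 11 ∨ n = 22 ∨ n = 33) then
      PySem.Dict.getD themeTable (pyReduce (pyDigitSum n)) "self"
    else "self"

-- ===== PORT B =====
def theme_py_alt (n : Int) : String :=
  match themeTable.get? n with          -- `if n in NUMBER_THEMES: return NUMBER_THEMES[n]`
  | some s => s
  | none =>
    if 9 < n then
      match themeTable.get? (1 + PySem.Int.mod (n - 1) 9) with
      | some s => s
      | none => "self"                  -- unreachable: the computed key is always a single-digit dict key
    else "self"

-- ===== PRECONDITION & SPEC =====
def Spec_theme_py (n : Int) (out : String) : Prop := out = theme_py_alt n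
instance (n : Int) (out : String) : Decidable (Spec_theme_py n out) := by unfold Spec_theme_py; infer_instance

-- ===== CLAIM (what is proved, stated in full; the proofs are below) =====
def Claim_equal_theme_py : Prop := ∀ (n : Int), Dom_theme_py n → Spec_theme_py n (theme_py n)

-- ===== LEMMAS AND PROOFS =====
lemma pyDigitSum_mod9 (r : Int) (h : 0 < r) : pyDigitSum r % 9 = r % 9 := by
  rw [pyDigitSum_eq r h]
  have hmod : r.toNat % 9 = (Nat.digits 10 r.toNat).sum % 9 := Nat.modEq_nine_digits_sum r.toNat
  omega

lemma pyReduce_eq : ∀ (k : ℕ) (r : Int), r.toNat ≤ k → 1 ≤ r → pyReduce r = 1 + (r - 1) % 9 := by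
  intro k
  induction k with
  | zero => intro r hk h1; omega
  | succ k IH =>
    intro r hk h1
    rw [pyReduce]
    by_cases h9 : 9 < r
    · rw [dif_pos h9]
      have hlt := pyDigitSum_lt r h9
      have hpos := pyDigitSum_pos r (by omega)
      have hmod := pyDigitSum_mod9 r (by omega)
      rw [IH (pyDigitSum r) (by omega) (by omega)]
      omega
    · rw [dif_neg h9]
      omega

lemma mod_fmod (n : Int) : PySem.Int.mod (n - 1) 9 = (n - 1) % 9 := by
  simp [PySem.Int.mod, Int.fmod_eq_emod]

theorem theme_py_spec : Claim_equal_theme_py := by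
  intro n _
  unfold Spec_theme_py theme_py theme_py_alt
  cases hg : themeTable.get? n with
  | some s => rfl
  | none =>
    simp only []
    by_cases h9 : 9 < n
    · have h11 : n ≠ 11 := by intro e; rw [e] at hg; exact absurd hg (by decide)
      have h22 : n ≠ 22 := by intro e; rw [e] at hg; exact absurd hg (by decide)
      have h33 : n ≠ 33 := by intro e; rw [e] at hg; exact absurd hg (by decide)
      rw [if_pos (by tauto : 9 < n ∧ ¬(n = 11 ∨ n = 22 ∨ n = 33)), if_pos h9]
      have hred : pyReduce (pyDigitSum n) = 1 + (n - 1) % 9 := by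
        have hpos := pyDigitSum_pos n (by omega)
        have hmod := pyDigitSum_mod9 n (by omega)
        rw [pyReduce_eq (pyDigitSum n).toNat (pyDigitSum n) le_rfl (by omega)]
        omega
      rw [hred, mod_fmod]
      have hb : 1 ≤ 1 + (n - 1) % 9 ∧ 1 + (n - 1) % 9 ≤ 9 := by omega
      set k : Int := 1 + (n - 1) % 9 with hk
      clear_value k
      obtain ⟨hb1, hb2⟩ := hb
      interval_cases k <;> decide
    · rw [if_neg (by tauto), if_neg h9]
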